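-- pv_equiv track=rewrite | github.com/HaoranLiu14/BugSum | EvaluationBehaviorCapture/EvaluationBehaviorCapture.py | DirectlyQuotedCommentNumberDetect
-- ===== SOURCE A (Python) =====
-- def DirectlyQuotedCommentNumberDetect(evaluationList, sentenceInvolved):
--     CommentNumber = len(sentenceInvolved)
--
--     CommentQuotedList = []  # Contain the quoted sentence index of each comment.(e.g. if comment1 contain [1,2,3,4] and 4 is quoted, then CommentQuotedList[1] = [4])
--     imptempty = []
--     for i in range(CommentNumber):
--         CommentQuotedList.append(imptempty.copy())
--
--     for SingleList in evaluationList: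
--         if (len(SingleList)>0):
--             for snumber in SingleList:
--                 for i in range(CommentNumber): #comment number
--                     if (snumber in sentenceInvolved[i]):
--                         CommentQuotedList[i].append(snumber)
--                         break
--     return CommentQuotedList
-- ===== SOURCE B (Python) =====
-- def DirectlyQuotedCommentNumberDetect(evaluationList, sentenceInvolved):
--     # Precompute: sentence number -> index of the FIRST comment containing it.
--     first = {}
--     for i, sent in enumerate(sentenceInvolved):
--         for s in sent:
--             if s not in first:
--                 first[s] = i
--     result = [[] for _ in sentenceInvolved]
--     for single in evaluationList:
--         for s in single:
--             i = first.get(s)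
--             if i is not None:
--                 result[i].append(s)
--     return result
-- ===== Notes on version B (the rewrite author's own statement) =====
-- stated objective: faster
-- what changed: Replaces the per-quoted-number linear scan over all comments (with an inner membership test) by a dict built once mapping each sentence number to its first containing comment index, so each quoted number is dispatched with one O(1) lookup.
import Mathlib
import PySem

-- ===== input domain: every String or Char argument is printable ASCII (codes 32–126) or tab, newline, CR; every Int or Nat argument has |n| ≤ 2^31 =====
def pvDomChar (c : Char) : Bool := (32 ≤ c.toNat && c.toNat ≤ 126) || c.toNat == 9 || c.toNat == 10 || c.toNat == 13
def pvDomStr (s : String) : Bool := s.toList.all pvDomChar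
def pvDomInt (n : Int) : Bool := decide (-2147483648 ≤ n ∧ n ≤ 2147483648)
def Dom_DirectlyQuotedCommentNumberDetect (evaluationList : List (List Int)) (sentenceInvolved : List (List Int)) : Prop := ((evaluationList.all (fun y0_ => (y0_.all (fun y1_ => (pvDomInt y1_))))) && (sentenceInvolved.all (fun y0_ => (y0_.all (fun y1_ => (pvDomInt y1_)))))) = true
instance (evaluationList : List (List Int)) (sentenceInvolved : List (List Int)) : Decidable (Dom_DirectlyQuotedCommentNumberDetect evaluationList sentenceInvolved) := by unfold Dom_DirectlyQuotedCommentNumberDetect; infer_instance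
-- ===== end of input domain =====

-- B replaces A's per-quoted-number linear scan over all comments by a dict mapping each
-- sentence number to its first containing comment index, built once (asymptotically faster).


-- ===== PORT A =====
-- A's inner 'for i in range(CommentNumber): if snumber in sentenceInvolved[i]: append; break'
-- ported as the same left-to-right scan over sentenceInvolved carrying the index i.
def pvInnerA (sentenceInvolved : List (List Int)) (i : Nat) (snumber : Int)
    (acc : List (List Int)) : List (List Int) :=
  match sentenceInvolved with
  | [] => acc
  | l :: rest =>
    if l.contains snumber then acc.modify i (fun q => q ++ [snumber])
    else pvInnerA rest (i + 1) snumber acc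

def DirectlyQuotedCommentNumberDetect (evaluationList : List (List Int)) (sentenceInvolved : List (List Int)) : List (List Int) :=
  let commentQuotedList := sentenceInvolved.map (fun _ => ([] : List Int))
  evaluationList.foldl (fun acc singleList =>
    if singleList.length > 0 then
      singleList.foldl (fun acc2 snumber => pvInnerA sentenceInvolved 0 snumber acc2) acc
    else acc) commentQuotedList

-- ===== PORT B =====
-- 'for i, sent in enumerate(sentenceInvolved): for s in sent: if s not in first: first[s] = i'
def pvFirstB (sentenceInvolved : List (List Int)) (i : Nat) (d : PySem.Dict Int Nat) : PySem.Dict Int Nat :=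
  match sentenceInvolved with
  | [] => d
  | sent :: rest =>
    pvFirstB rest (i + 1)
      (sent.foldl (fun d s => if d.contains s then d else d.insert s i) d)

def DirectlyQuotedCommentNumberDetect_alt (evaluationList : List (List Int)) (sentenceInvolved : List (List Int)) : List (List Int) :=
  let first := pvFirstB sentenceInvolved 0 PySem.Dict.empty
  let result := sentenceInvolved.map (fun _ => ([] : List Int))
  evaluationList.foldl (fun acc single =>
    single.foldl (fun acc s =>
      match first.get? s with
      | some i => acc.modify i (fun q => q ++ [s])
      | none => acc) acc) result

-- ===== PRECONDITION & SPEC =====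
def Spec_DirectlyQuotedCommentNumberDetect (evaluationList : List (List Int)) (sentenceInvolved : List (List Int)) (out : List (List Int)) : Prop := out = DirectlyQuotedCommentNumberDetect_alt evaluationList sentenceInvolved
instance (evaluationList : List (List Int)) (sentenceInvolved : List (List Int)) (out : List (List Int)) : Decidable (Spec_DirectlyQuotedCommentNumberDetect evaluationList sentenceInvolved out) := by unfold Spec_DirectlyQuotedCommentNumberDetect; infer_instance

-- ===== CLAIM (what is proved, stated in full; the proofs are below) =====
def Claim_equal_DirectlyQuotedCommentNumberDetect : Prop := ∀ (evaluationList : List (List Int)) (sentenceInvolved : List (List Int)), Dom_DirectlyQuotedCommentNumberDetect evaluationList sentenceInvolved → Spec_DirectlyQuotedCommentNumberDetect evaluationList sentenceInvolved (DirectlyQuotedCommentNumberDetect evaluationList sentenceInvolved)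

-- ===== LEMMAS AND PROOFS =====

-- Index (as Option Nat) of the first list in `si` containing `s`.
def pvScan (si : List (List Int)) (s : Int) : Option Nat :=
  match si with
  | [] => none
  | l :: rest => if l.contains s then some 0 else (pvScan rest s).map (· + 1)

-- A's inner scan, characterised by pvScan.
theorem pvInnerA_eq_scan (si : List (List Int)) (i : Nat) (s : Int) (acc : List (List Int)) :
    pvInnerA si i s acc =
      match pvScan si s with
      | none => acc
      | some j => acc.modify (i + j) (fun q => q ++ [s]) := by
  induction si generalizing i with
  | nil => rfl
  | cons l rest ih =>
    simp only [pvInnerA, pvScan]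
    by_cases h : s ∈ l
    · simp [h]
    · simp only [h, decide_false, Bool.false_eq_true, if_false, List.contains_eq_mem,
        ih (i + 1)]
      cases hs : pvScan rest s with
      | none => simp
      | some j => simp [Nat.add_assoc, Nat.add_comm 1 j]

-- One comment's pass of B's dict-building loop.
theorem pvFirstB_inner (sent : List Int) (i : Nat) (d : PySem.Dict Int Nat) (s : Int) :
    (sent.foldl (fun d s' => if d.contains s' then d else d.insert s' i) d).get? s =
      match d.get? s with
      | some j => some j
      | none => if sent.contains s then some i else none := by
  induction sent generalizing d with
  | nil => cases hd : d.get? s <;> simp [hd]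
  | cons x rest ih =>
    simp only [List.foldl_cons]
    by_cases hx : d.contains x = true
    · rw [if_pos hx, ih]
      cases hd : d.get? s with
      | some j => simp
      | none =>
        by_cases hsx : s = x
        · subst hsx
          rw [PySem.Dict.contains_eq_isSome_get?, hd] at hx
          simp at hx
        · simp [hsx]
    · rw [if_neg hx, ih, PySem.Dict.get?_insert]
      by_cases hsx : s = x
      · subst hsx
        rw [PySem.Dict.contains_eq_isSome_get?] at hx
        have hd : d.get? s = none := by
          cases h : d.get? s with
          | none => rfl
          | some j => rw [h] at hx; simp at hx
        simp [hd]
      · cases hd : d.get? s with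
        | some j => simp [hsx]
        | none => simp [hsx]

-- B's dict lookup = first-match scan (offset by i), unless already set in d.
theorem pvFirstB_get (si : List (List Int)) (i : Nat) (d : PySem.Dict Int Nat) (s : Int) :
    (pvFirstB si i d).get? s =
      match d.get? s with
      | some j => some j
      | none => (pvScan si s).map (· + i) := by
  induction si generalizing i d with
  | nil => cases hd : d.get? s <;> simp [pvFirstB, pvScan, hd]
  | cons sent rest ih =>
    simp only [pvFirstB, pvScan, ih, pvFirstB_inner]
    cases hd : d.get? s with
    | some j => rfl
    | none =>
      by_cases hc : s ∈ sent
      · simp [hc]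
      · simp only [hc, decide_false, Bool.false_eq_true, if_false, List.contains_eq_mem]
        cases hs : pvScan rest s with
        | none => rfl
        | some j => simp [Nat.add_assoc, Nat.add_comm 1 i]

theorem pvFirst_top (si : List (List Int)) (s : Int) :
    (pvFirstB si 0 PySem.Dict.empty).get? s = pvScan si s := by
  rw [pvFirstB_get]
  simp [PySem.Dict.get?_empty]

-- The per-number steps of A and B coincide.
theorem step_eq (si : List (List Int)) (s : Int) (acc : List (List Int)) :
    pvInnerA si 0 s acc =
      (match (pvFirstB si 0 PySem.Dict.empty).get? s with
       | some i => acc.modify i (fun q => q ++ [s])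
       | none => acc) := by
  rw [pvInnerA_eq_scan, pvFirst_top]
  cases pvScan si s <;> simp

-- ===== VERDICT (by name: the statement is the Claim_ definition above) =====
theorem DirectlyQuotedCommentNumberDetect_spec : Claim_equal_DirectlyQuotedCommentNumberDetect := by
  intro ev si _
  unfold Spec_DirectlyQuotedCommentNumberDetect
  unfold DirectlyQuotedCommentNumberDetect DirectlyQuotedCommentNumberDetect_alt
  simp only []
  congr 1
  funext acc sl
  have hbody : sl.foldl (fun acc2 s => pvInnerA si 0 s acc2) acc =
      sl.foldl (fun acc s =>
        match (pvFirstB si 0 PySem.Dict.empty).get? s with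
        | some i => acc.modify i (fun q => q ++ [s])
        | none => acc) acc := by
    induction sl generalizing acc with
    | nil => rfl
    | cons x rest ih => simp only [List.foldl_cons, step_eq]
  cases sl with
  | nil => rfl
  | cons x rest => simpa using hbody
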